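-- pv_equiv track=rewrite | github.com/benkirk/sam-queries | src/webapp/dashboards/allocations/blueprint.py | group_by_resource_facility
-- ===== SOURCE A (Python) =====
-- from typing import List, Dict
--
-- def group_by_resource_facility(summary_data: List[Dict]) -> Dict:
--     """
--     Transform flat summary list into nested structure for tabs.
--
--     Args:
--         summary_data: List of allocation summary dicts from get_allocation_summary()
--
--     Returns:
--         Nested dict structure:
--         {
--             'Derecho': {
--                 'UNIV': [
--                     {'allocation_type': 'NSC', 'total_amount': 641710650, 'count': 26, ...},
--                     {'allocation_type': 'Small', 'total_amount': 177267070, 'count': 248, ...}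
--                 ],
--                 'WNA': [...]
--             },
--             'Casper': {...}
--         }
--     """
--     grouped = {}
--     for row in summary_data:
--         resource = row['resource']
--         facility = row['facility']
--
--         if resource not in grouped:
--             grouped[resource] = {}
--         if facility not in grouped[resource]:
--             grouped[resource][facility] = []
--
--         grouped[resource][facility].append(row)
--
--     return grouped
-- ===== SOURCE B (Python) =====
-- from typing import List, Dict
--
-- def group_by_resource_facility(summary_data: List[Dict]) -> Dict:
--     # Pass 1: one flat dict keyed by the (resource, facility) pair collects the rows.
--     flat = {}
--     for row in summary_data:
--         flat.setdefault((row['resource'], row['facility']), []).append(row)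
--     # Pass 2: nest the flat dict; dict insertion order reproduces first-appearance order.
--     grouped = {}
--     for (resource, facility), rows in flat.items():
--         grouped.setdefault(resource, {})[facility] = rows
--     return grouped
-- ===== Notes on version B (the rewrite author's own statement) =====
-- stated objective: alternative
-- what changed: B replaces A's one-pass nested-dict mutation with a two-pass pipeline: first a flat dict keyed by the (resource, facility) pair collects the rows, then a second pass nests that flat dict; dict insertion order reproduces A's first-appearance ordering.
import Mathlib
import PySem

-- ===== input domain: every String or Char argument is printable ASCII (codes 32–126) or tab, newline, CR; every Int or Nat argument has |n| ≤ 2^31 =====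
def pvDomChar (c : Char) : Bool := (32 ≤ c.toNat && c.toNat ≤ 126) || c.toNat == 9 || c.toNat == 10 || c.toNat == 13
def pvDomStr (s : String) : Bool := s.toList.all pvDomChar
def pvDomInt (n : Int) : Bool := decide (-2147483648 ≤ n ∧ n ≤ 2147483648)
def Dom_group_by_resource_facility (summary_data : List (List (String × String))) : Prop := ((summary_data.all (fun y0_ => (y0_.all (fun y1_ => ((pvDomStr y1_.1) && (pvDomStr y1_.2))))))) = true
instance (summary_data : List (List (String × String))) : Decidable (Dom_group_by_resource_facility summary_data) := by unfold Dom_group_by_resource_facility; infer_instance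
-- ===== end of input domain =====

-- B replaces A's one-pass nested-dict mutation by a two-pass pipeline (flat dict keyed by the
-- (resource, facility) pair, then nesting); same cost, genuinely different decomposition.


-- ===== PORT A =====
-- row['resource'] / row['facility']: a row is a dict; the lookup is PySem.Dict.getD, total with a
-- dummy default — Pre_ below admits only rows that actually contain both keys (else Python raises KeyError).
def pvRowRes (row : List (String × String)) : String := (PySem.Dict.mk row).getD "resource" ""
def pvRowFac (row : List (String × String)) : String := (PySem.Dict.mk row).getD "facility" ""

def group_by_resource_facility (summary_data : List (List (String × String))) : List (String × List (String × List (List (String × String)))) :=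
  let grouped :=
    summary_data.foldl (fun grouped row =>
      let resource := pvRowRes row
      let facility := pvRowFac row
      let grouped := if grouped.contains resource then grouped else grouped.insert resource PySem.Dict.empty
      let inner := grouped.getD resource PySem.Dict.empty
      let inner := if inner.contains facility then inner else inner.insert facility ([] : List (List (String × String)))
      let inner := inner.modify facility [] (fun xs => xs ++ [row])   -- grouped[resource][facility].append(row)
      grouped.insert resource inner)
      (PySem.Dict.empty : PySem.Dict String (PySem.Dict String (List (List (String × String)))))
  grouped.items.map (fun p => (p.1, p.2.items))

-- ===== PORT B =====
def group_by_resource_facility_alt (summary_data : List (List (String × String))) : List (String × List (String × List (List (String × String)))) :=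
  let flat :=
    summary_data.foldl (fun flat row =>
      flat.modify (pvRowRes row, pvRowFac row) [] (fun xs => xs ++ [row]))   -- flat.setdefault((res, fac), []).append(row)
      (PySem.Dict.empty : PySem.Dict (String × String) (List (List (String × String))))
  let grouped :=
    flat.items.foldl (fun grouped p =>
      let grouped := grouped.setdefault p.1.1 PySem.Dict.empty
      grouped.insert p.1.1 ((grouped.getD p.1.1 PySem.Dict.empty).insert p.1.2 p.2))   -- grouped.setdefault(res, {})[fac] = rows
      (PySem.Dict.empty : PySem.Dict String (PySem.Dict String (List (List (String × String)))))
  grouped.items.map (fun p => (p.1, p.2.items))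

-- ===== PRECONDITION & SPEC =====
-- Pre_ excludes rows missing a 'resource' or 'facility' key (A raises KeyError there) and rows whose
-- association list repeats a key, which a Python dict cannot represent (dict construction keeps the
-- last value for a repeated key while the assoc-list encoding's lookup is first-match).
def Pre_group_by_resource_facility (summary_data : List (List (String × String))) : Prop :=
  ∀ row ∈ summary_data, (row.map Prod.fst).Nodup ∧
    (PySem.Dict.mk row).contains "resource" = true ∧ (PySem.Dict.mk row).contains "facility" = true
instance (summary_data : List (List (String × String))) : Decidable (Pre_group_by_resource_facility summary_data) := by unfold Pre_group_by_resource_facility; infer_instance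
def pvWitness_group_by_resource_facility : (List (List (String × String))) := ([[("resource", "r"), ("facility", "f")]])

def Spec_group_by_resource_facility (summary_data : List (List (String × String))) (out : List (String × List (String × List (List (String × String))))) : Prop := out = group_by_resource_facility_alt summary_data
instance (summary_data : List (List (String × String))) (out : List (String × List (String × List (List (String × String))))) : Decidable (Spec_group_by_resource_facility summary_data out) := by
  unfold Spec_group_by_resource_facility
  letI : DecidableEq (List (String × List (List (String × String)))) := inferInstance
  infer_instance

-- ===== CLAIM (what is proved, stated in full; the proofs are below) =====
def Claim_equal_group_by_resource_facility : Prop := ∀ (summary_data : List (List (String × String))), Dom_group_by_resource_facility summary_data → Pre_group_by_resource_facility summary_data → Spec_group_by_resource_facility summary_data (group_by_resource_facility summary_data)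

-- ===== LEMMAS AND PROOFS =====

-- Abbreviations for the proofs.
def pvMD (inner : PySem.Dict String (List (List (String × String)))) (row : List (String × String)) : PySem.Dict String (List (List (String × String))) :=
  inner.modify (pvRowFac row) [] (fun xs => xs ++ [row])

def pvGA (g : PySem.Dict String (PySem.Dict String (List (List (String × String))))) (row : List (String × String)) : PySem.Dict String (PySem.Dict String (List (List (String × String)))) :=
  g.insert (pvRowRes row) (pvMD (g.getD (pvRowRes row) PySem.Dict.empty) row)

def pvGB (g : PySem.Dict String (PySem.Dict String (List (List (String × String))))) (p : (String × String) × List (List (String × String))) : PySem.Dict String (PySem.Dict String (List (List (String × String)))) :=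
  g.insert p.1.1 ((g.getD p.1.1 PySem.Dict.empty).insert p.1.2 p.2)

def pvLr (sd : List (List (String × String))) (res : String) : List (List (String × String)) :=
  sd.filter (fun row => pvRowRes row == res)

-- canonical nested form both pipelines are proved equal to
def pvCanon (sd : List (List (String × String))) : List (String × List (String × List (List (String × String)))) :=
  (PySem.Set.ofList (sd.map pvRowRes)).map (fun res =>
    (res, (PySem.Set.ofList ((pvLr sd res).map pvRowFac)).map (fun fac =>
      (fac, (pvLr sd res).filter (fun row => pvRowFac row == fac)))))

-- Set.ofList commutes with a later dedup, with filter, and with an injective map.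
lemma pv_ofList_map_ofList {α β : Type} [BEq α] [LawfulBEq α] [BEq β] [LawfulBEq β] (f : α → β) (xs : List α) :
    PySem.Set.ofList ((PySem.Set.ofList xs).map f) = PySem.Set.ofList (xs.map f) := by
  induction xs using List.reverseRecOn with
  | nil => rfl
  | append_singleton xs x ih =>
    rw [PySem.Set.ofList_append_singleton]
    by_cases hx : x ∈ PySem.Set.ofList xs
    · rw [PySem.Set.add_of_mem hx, ih, List.map_append, List.map_singleton,
        PySem.Set.ofList_append_singleton,
        PySem.Set.add_of_mem (by
          rw [PySem.Set.mem_ofList]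
          exact List.mem_map_of_mem ((PySem.Set.mem_ofList xs x).1 hx))]
    · rw [PySem.Set.add_of_not_mem hx, List.map_append, List.map_singleton,
        PySem.Set.ofList_append_singleton, ih, List.map_append, List.map_singleton,
        PySem.Set.ofList_append_singleton]

lemma pv_ofList_filter {α : Type} [BEq α] [LawfulBEq α] (p : α → Bool) (xs : List α) :
    (PySem.Set.ofList xs).filter p = PySem.Set.ofList (xs.filter p) := by
  induction xs using List.reverseRecOn with
  | nil => rfl
  | append_singleton xs x ih =>
    rw [PySem.Set.ofList_append_singleton, List.filter_append]
    by_cases hx : x ∈ PySem.Set.ofList xs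
    · rw [PySem.Set.add_of_mem hx, ih]
      cases hp : p x with
      | true =>
        simp only [List.filter_singleton, hp, cond_true, PySem.Set.ofList_append_singleton]
        rw [PySem.Set.add_of_mem (by
          rw [PySem.Set.mem_ofList, List.mem_filter]
          exact ⟨(PySem.Set.mem_ofList xs x).1 hx, hp⟩)]
      | false => simp only [List.filter_singleton, hp, cond_false, List.append_nil]
    · rw [PySem.Set.add_of_not_mem hx, List.filter_append, ih]
      cases hp : p x with
      | true =>
        simp only [List.filter_singleton, hp, cond_true, PySem.Set.ofList_append_singleton]
        rw [PySem.Set.add_of_not_mem (by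
          rw [PySem.Set.mem_ofList, List.mem_filter]
          intro h
          exact hx ((PySem.Set.mem_ofList xs x).2 h.1))]
      | false => simp only [List.filter_singleton, hp, cond_false, List.append_nil]

lemma pv_ofList_map_inj {α β : Type} [BEq α] [LawfulBEq α] [BEq β] [LawfulBEq β] (f : α → β)
    (hf : Function.Injective f) (xs : List α) :
    PySem.Set.ofList (xs.map f) = (PySem.Set.ofList xs).map f := by
  induction xs using List.reverseRecOn with
  | nil => rfl
  | append_singleton xs x ih =>
    rw [List.map_append, List.map_singleton, PySem.Set.ofList_append_singleton, ih,
      PySem.Set.ofList_append_singleton]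
    by_cases hx : x ∈ PySem.Set.ofList xs
    · rw [PySem.Set.add_of_mem hx, PySem.Set.add_of_mem (List.mem_map_of_mem hx)]
    · rw [PySem.Set.add_of_not_mem hx, PySem.Set.add_of_not_mem (by
        intro h
        obtain ⟨y, hy, hxy⟩ := List.mem_map.1 h
        exact hx (hf hxy ▸ hy)), List.map_append, List.map_singleton]

-- A's loop body is pvGA.
lemma pv_stepA_eq (g : PySem.Dict String (PySem.Dict String (List (List (String × String))))) (row : List (String × String)) :
    (let resource := pvRowRes row
     let facility := pvRowFac row
     let g' := if g.contains resource then g else g.insert resource PySem.Dict.empty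
     let inner := g'.getD resource PySem.Dict.empty
     let inner := if inner.contains facility then inner else inner.insert facility ([] : List (List (String × String)))
     let inner := inner.modify facility [] (fun xs => xs ++ [row])
     g'.insert resource inner) = pvGA g row := by
  show (let g' := if g.contains (pvRowRes row) then g else g.insert (pvRowRes row) PySem.Dict.empty
        let inner := g'.getD (pvRowRes row) PySem.Dict.empty
        let inner := if inner.contains (pvRowFac row) then inner else inner.insert (pvRowFac row) []
        g'.insert (pvRowRes row) (inner.modify (pvRowFac row) [] (fun xs => xs ++ [row]))) = pvGA g row
  by_cases hc : g.contains (pvRowRes row) = true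
  · simp only [hc, if_true, pvGA, pvMD]
    by_cases hf : (g.getD (pvRowRes row) PySem.Dict.empty).contains (pvRowFac row) = true
    · simp only [hf, if_true]
    · simp only [hf, if_false, Bool.false_eq_true, PySem.Dict.modify,
        PySem.Dict.getD_insert_self, PySem.Dict.insert_insert_self,
        PySem.Dict.getD_of_not_contains _ _ (Bool.not_eq_true _ ▸ hf : _ = false),
        List.nil_append]
  · have hc' : g.contains (pvRowRes row) = false := by simpa using hc
    simp only [hc', if_false, Bool.false_eq_true, PySem.Dict.getD_insert_self,
      PySem.Dict.contains_empty, PySem.Dict.modify, PySem.Dict.getD_empty,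
      PySem.Dict.insert_insert_self, pvGA, pvMD,
      PySem.Dict.getD_of_not_contains _ _ hc', List.nil_append]

-- B's second-loop body is pvGB.
lemma pv_stepB_eq (g : PySem.Dict String (PySem.Dict String (List (List (String × String))))) (p : (String × String) × List (List (String × String))) :
    (let g' := g.setdefault p.1.1 PySem.Dict.empty
     g'.insert p.1.1 ((g'.getD p.1.1 PySem.Dict.empty).insert p.1.2 p.2)) = pvGB g p := by
  by_cases hc : g.contains p.1.1 = true
  · simp only [PySem.Dict.setdefault_of_contains _ _ hc, pvGB]
  · have hc' : g.contains p.1.1 = false := by simpa using hc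
    simp only [PySem.Dict.setdefault_of_not_contains _ _ hc', PySem.Dict.getD_insert_self,
      PySem.Dict.insert_insert_self, pvGB, PySem.Dict.getD_of_not_contains _ _ hc']

-- projection of A's fold at one resource
lemma pv_projA (l : List (List (String × String))) (g : PySem.Dict String (PySem.Dict String (List (List (String × String))))) (res : String) :
    (l.foldl pvGA g).getD res PySem.Dict.empty
      = (l.filter (fun row => pvRowRes row == res)).foldl pvMD (g.getD res PySem.Dict.empty) := by
  induction l generalizing g with
  | nil => rfl
  | cons a t ih =>
    simp only [List.foldl_cons, List.filter_cons]
    by_cases h : pvRowRes a = res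
    · simp only [h, beq_self_eq_true, if_true, List.foldl_cons, ih]
      congr 1
      simp only [pvGA, h, PySem.Dict.getD_insert_self]
    · have hb : (pvRowRes a == res) = false := by simpa using h
      simp only [hb, Bool.false_eq_true, if_false, ih]
      congr 1
      exact PySem.Dict.getD_insert_of_ne _ _ _ (fun he => h he.symm)

-- projection of B's nesting fold at one resource
lemma pv_projB (l : List ((String × String) × List (List (String × String)))) (g : PySem.Dict String (PySem.Dict String (List (List (String × String))))) (res : String) :
    (l.foldl pvGB g).getD res PySem.Dict.empty
      = (l.filter (fun p => p.1.1 == res)).foldl (fun inner p => inner.insert p.1.2 p.2) (g.getD res PySem.Dict.empty) := by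
  induction l generalizing g with
  | nil => rfl
  | cons a t ih =>
    simp only [List.foldl_cons, List.filter_cons]
    by_cases h : a.1.1 = res
    · simp only [h, beq_self_eq_true, if_true, List.foldl_cons, ih]
      congr 1
      simp only [pvGB, h, PySem.Dict.getD_insert_self]
    · have hb : (a.1.1 == res) = false := by simpa using h
      simp only [hb, Bool.false_eq_true, if_false, ih]
      congr 1
      exact PySem.Dict.getD_insert_of_ne _ _ _ (fun he => h he.symm)

-- the inner modify-fold, characterised
lemma pv_inner_getD (lr : List (List (String × String))) (fac : String) :
    (lr.foldl pvMD PySem.Dict.empty).getD fac []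
      = lr.filter (fun row => pvRowFac row == fac) := by
  have h := PySem.Dict.getD_foldl_modify_append (lr.map (fun row => (pvRowFac row, row)))
    PySem.Dict.empty fac
  rw [List.foldl_map] at h
  rw [show (fun (x : PySem.Dict String (List (List (String × String)))) (y : List (String × String)) =>
      x.modify (pvRowFac y, y).1 [] fun xs => xs ++ [(pvRowFac y, y).2]) = pvMD from rfl] at h
  rw [h, PySem.Dict.getD_empty, List.nil_append, List.filter_map, List.map_map]
  simp only [Function.comp_def]
  exact List.map_id _

lemma pv_inner_items (lr : List (List (String × String))) :
    (lr.foldl pvMD PySem.Dict.empty).items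
      = (PySem.Set.ofList (lr.map pvRowFac)).map (fun fac =>
          (fac, lr.filter (fun row => pvRowFac row == fac))) := by
  have hk : (lr.foldl pvMD PySem.Dict.empty).keys = PySem.Set.ofList (lr.map pvRowFac) := by
    have := PySem.Dict.keys_foldl_modify_key lr pvRowFac ([] : List (List (String × String)))
      (fun _ row => fun xs => xs ++ [row]) PySem.Dict.empty
    simpa [pvMD, PySem.Dict.keys_empty, PySem.Set.update_nil_left] using this
  have hnd : (lr.foldl pvMD PySem.Dict.empty).keys.Nodup := by
    have := PySem.Dict.nodup_keys_foldl_modify_key lr pvRowFac ([] : List (List (String × String)))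
      (fun _ row => fun xs => xs ++ [row]) PySem.Dict.empty (by simp [PySem.Dict.keys_empty])
    simpa [pvMD] using this
  rw [PySem.Dict.items_eq_map_keys _ hnd [], hk]
  exact List.map_congr_left (fun fac _ => by rw [pv_inner_getD])

-- A's pipeline equals the canonical form.
lemma pv_A_eq (sd : List (List (String × String))) :
    group_by_resource_facility sd = pvCanon sd := by
  have hfun : (fun (grouped : PySem.Dict String (PySem.Dict String (List (List (String × String))))) row =>
      let resource := pvRowRes row
      let facility := pvRowFac row
      let grouped := if grouped.contains resource then grouped else grouped.insert resource PySem.Dict.empty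
      let inner := grouped.getD resource PySem.Dict.empty
      let inner := if inner.contains facility then inner else inner.insert facility ([] : List (List (String × String)))
      let inner := inner.modify facility [] (fun xs => xs ++ [row])
      grouped.insert resource inner) = pvGA := by
    funext g row; exact pv_stepA_eq g row
  show ((sd.foldl _ PySem.Dict.empty).items).map _ = pvCanon sd
  rw [hfun]
  have hkeys : (sd.foldl pvGA PySem.Dict.empty).keys = PySem.Set.ofList (sd.map pvRowRes) := by
    have := PySem.Dict.keys_foldl_insert_key sd pvRowRes
      (fun g row => pvMD (g.getD (pvRowRes row) PySem.Dict.empty) row) PySem.Dict.empty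
    simpa [pvGA, PySem.Dict.keys_empty, PySem.Set.update_nil_left] using this
  have hnd : (sd.foldl pvGA PySem.Dict.empty).keys.Nodup := by
    have := PySem.Dict.nodup_keys_foldl_insert_key sd pvRowRes
      (fun g row => pvMD (g.getD (pvRowRes row) PySem.Dict.empty) row) PySem.Dict.empty
      (by simp [PySem.Dict.keys_empty])
    simpa [pvGA] using this
  rw [PySem.Dict.items_eq_map_keys _ hnd PySem.Dict.empty, hkeys, List.map_map, pvCanon]
  refine List.map_congr_left (fun res _ => ?_)
  simp only [Function.comp]
  rw [pv_projA, PySem.Dict.getD_empty, pv_inner_items]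
  rfl

-- B's flat dict, characterised
lemma pv_flat_getD (sd : List (List (String × String))) (k : String × String) :
    ((sd.foldl (fun flat row => flat.modify (pvRowRes row, pvRowFac row) [] (fun xs => xs ++ [row])) PySem.Dict.empty)).getD k []
      = sd.filter (fun row => (pvRowRes row, pvRowFac row) == k) := by
  have h := PySem.Dict.getD_foldl_modify_append (sd.map (fun row => ((pvRowRes row, pvRowFac row), row)))
    PySem.Dict.empty k
  rw [List.foldl_map] at h
  rw [h, PySem.Dict.getD_empty, List.nil_append, List.filter_map, List.map_map]
  simp only [Function.comp_def]
  exact List.map_id _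

-- B's pipeline equals the canonical form.
lemma pv_B_eq (sd : List (List (String × String))) :
    group_by_resource_facility_alt sd = pvCanon sd := by
  have hfunB : (fun (grouped : PySem.Dict String (PySem.Dict String (List (List (String × String))))) (p : (String × String) × List (List (String × String))) =>
      let grouped := grouped.setdefault p.1.1 PySem.Dict.empty
      grouped.insert p.1.1 ((grouped.getD p.1.1 PySem.Dict.empty).insert p.1.2 p.2)) = pvGB := by
    funext g p; exact pv_stepB_eq g p
  show (((sd.foldl _ PySem.Dict.empty).items.foldl _ PySem.Dict.empty).items).map _ = pvCanon sd
  rw [hfunB]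
  set flat := sd.foldl (fun flat row => flat.modify (pvRowRes row, pvRowFac row) [] (fun xs => xs ++ [row])) PySem.Dict.empty with hflat
  have hkF : flat.keys = PySem.Set.ofList (sd.map (fun row => (pvRowRes row, pvRowFac row))) := by
    have := PySem.Dict.keys_foldl_modify_key sd (fun row => (pvRowRes row, pvRowFac row))
      ([] : List (List (String × String))) (fun _ row => fun xs => xs ++ [row]) PySem.Dict.empty
    simpa [hflat, PySem.Dict.keys_empty, PySem.Set.update_nil_left] using this
  have hndF : flat.keys.Nodup := by
    have := PySem.Dict.nodup_keys_foldl_modify_key sd (fun row => (pvRowRes row, pvRowFac row))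
      ([] : List (List (String × String))) (fun _ row => fun xs => xs ++ [row]) PySem.Dict.empty
      (by simp [PySem.Dict.keys_empty])
    simpa [hflat] using this
  have hitemsF : flat.items
      = (PySem.Set.ofList (sd.map (fun row => (pvRowRes row, pvRowFac row)))).map (fun k =>
          (k, sd.filter (fun row => (pvRowRes row, pvRowFac row) == k))) := by
    rw [PySem.Dict.items_eq_map_keys _ hndF [], hkF]
    exact List.map_congr_left (fun k _ => by rw [pv_flat_getD])
  -- outer keys of the nesting fold
  have hkeysB : (flat.items.foldl pvGB PySem.Dict.empty).keys = PySem.Set.ofList (sd.map pvRowRes) := by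
    have := PySem.Dict.keys_foldl_insert_key flat.items (fun p => p.1.1)
      (fun g p => (g.getD p.1.1 PySem.Dict.empty).insert p.1.2 p.2) PySem.Dict.empty
    rw [show (fun (g : PySem.Dict String (PySem.Dict String (List (List (String × String))))) (p : (String × String) × List (List (String × String))) => g.insert p.1.1 ((g.getD p.1.1 PySem.Dict.empty).insert p.1.2 p.2)) = pvGB from rfl] at this
    rw [this, PySem.Dict.keys_empty, PySem.Set.update_nil_left, hitemsF, List.map_map]
    have : ((fun (p : (String × String) × List (List (String × String))) => p.1.1) ∘ fun k =>
        (k, sd.filter (fun row => (pvRowRes row, pvRowFac row) == k))) = Prod.fst := rfl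
    rw [this, pv_ofList_map_ofList, List.map_map]
    rfl
  have hndB : (flat.items.foldl pvGB PySem.Dict.empty).keys.Nodup := by
    have := PySem.Dict.nodup_keys_foldl_insert_key flat.items (fun p => p.1.1)
      (fun g p => (g.getD p.1.1 PySem.Dict.empty).insert p.1.2 p.2) PySem.Dict.empty
      (by simp [PySem.Dict.keys_empty])
    simpa [pvGB] using this
  rw [PySem.Dict.items_eq_map_keys _ hndB PySem.Dict.empty, hkeysB, List.map_map, pvCanon]
  refine List.map_congr_left (fun res _ => ?_)
  simp only [Function.comp]
  rw [pv_projB, PySem.Dict.getD_empty]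
  -- the filtered flat items at this resource
  have hfilter : flat.items.filter (fun p => p.1.1 == res)
      = ((PySem.Set.ofList ((pvLr sd res).map pvRowFac)).map (fun fac => (res, fac))).map (fun k =>
          (k, sd.filter (fun row => (pvRowRes row, pvRowFac row) == k))) := by
    rw [hitemsF, List.filter_map]
    congr 1
    have hpred : ((fun (p : (String × String) × List (List (String × String))) => p.1.1 == res) ∘ fun k =>
        (k, sd.filter (fun row => (pvRowRes row, pvRowFac row) == k))) = (fun k => k.1 == res) := rfl
    rw [hpred, pv_ofList_filter, List.filter_map]
    have hpred2 : ((fun (k : String × String) => k.1 == res) ∘ fun row => (pvRowRes row, pvRowFac row))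
        = (fun row => pvRowRes row == res) := rfl
    rw [hpred2]
    have hmapc : (pvLr sd res).map (fun row => (pvRowRes row, pvRowFac row))
        = ((pvLr sd res).map pvRowFac).map (fun fac => (res, fac)) := by
      rw [List.map_map]
      refine List.map_congr_left (fun row hrow => ?_)
      have : pvRowRes row = res := by
        have := (List.mem_filter.1 hrow).2
        simpa using this
      simp [Function.comp, this]
    rw [show sd.filter (fun row => pvRowRes row == res) = pvLr sd res from rfl, hmapc,
      pv_ofList_map_inj _ (fun a b h => by simpa using congrArg Prod.snd h)]
  rw [hfilter]
  -- fold of inserts over fresh distinct keys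
  have hsnd : ((((PySem.Set.ofList ((pvLr sd res).map pvRowFac)).map (fun fac => (res, fac))).map (fun k =>
        (k, sd.filter (fun row => (pvRowRes row, pvRowFac row) == k)))).map (fun p => p.1.2))
      = PySem.Set.ofList ((pvLr sd res).map pvRowFac) := by
    rw [List.map_map, List.map_map]
    exact (List.map_congr_left (g := id) (fun fac _ => rfl)).trans (List.map_id _)
  have hfresh := PySem.Dict.items_foldl_insert_fresh
    (((PySem.Set.ofList ((pvLr sd res).map pvRowFac)).map (fun fac => (res, fac))).map (fun k =>
        (k, sd.filter (fun row => (pvRowRes row, pvRowFac row) == k))))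
    (fun p => p.1.2) (fun p => p.2) PySem.Dict.empty
    (fun a _ => PySem.Dict.contains_empty _)
    (by rw [hsnd]; exact PySem.Set.nodup_ofList _)
  rw [hfresh]
  refine congrArg (fun l => (res, l)) ?_
  simp only [PySem.Dict.empty, List.nil_append, List.map_map, Function.comp_def]
  refine List.map_congr_left (fun fac _ => ?_)
  refine congrArg (fun l => (fac, l)) ?_
  rw [show (pvLr sd res) = sd.filter (fun row => pvRowRes row == res) from rfl, List.filter_filter]
  exact List.filter_congr (fun row _ => by
    show ((pvRowRes row, pvRowFac row) == (res, fac)) = ((pvRowFac row == fac) && (pvRowRes row == res))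
    rw [show ((pvRowRes row, pvRowFac row) == (res, fac)) = ((pvRowRes row == res) && (pvRowFac row == fac)) from rfl]
    exact Bool.and_comm _ _)

-- ===== VERDICT (by name: the statement is the Claim_ definition above) =====
theorem group_by_resource_facility_spec : Claim_equal_group_by_resource_facility := by
  intro sd _ _
  unfold Spec_group_by_resource_facility
  rw [pv_A_eq, pv_B_eq]
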